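-- pv_equiv track=rewrite | github.com/harjassand/AGI-Stack-Unchained | agi-orchestrator/orchestrator/agent_policy.py | _split_top_level_arrows
-- ===== SOURCE A (Python) =====
-- def _split_top_level_arrows(type_norm: str) -> list[str]:
--     parts: list[str] = []
--     buf: list[str] = []
--     depth = 0
--     i = 0
--     while i < len(type_norm):
--         ch = type_norm[i]
--         if ch in "([":
--             depth += 1
--             buf.append(ch)
--             i += 1
--             continue
--         if ch in ")]":
--             depth = max(0, depth - 1)
--             buf.append(ch)
--             i += 1
--             continue
--         if depth == 0 and type_norm[i : i + 2] == "->":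
--             part = "".join(buf).strip()
--             if part:
--                 parts.append(part)
--             buf = []
--             i += 2
--             continue
--         buf.append(ch)
--         i += 1
--     tail = "".join(buf).strip()
--     if tail:
--         parts.append(tail)
--     return parts
-- ===== SOURCE B (Python) =====
-- def _split_top_level_arrows(type_norm: str) -> list[str]:
--     # Pass 1: collect (start, end) boundaries of top-level arrow-separated segments.
--     bounds = []
--     depth = 0
--     start = 0
--     i = 0
--     n = len(type_norm)
--     while i < n:
--         ch = type_norm[i]
--         if ch in "([":
--             depth += 1
--             i += 1
--         elif ch in ")]":
--             depth = max(0, depth - 1)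
--             i += 1
--         elif depth == 0 and type_norm[i : i + 2] == "->":
--             bounds.append((start, i))
--             start = i + 2
--             i += 2
--         else:
--             i += 1
--     bounds.append((start, n))
--     # Pass 2: slice out each segment, strip it, keep the non-empty ones.
--     out = []
--     for s, e in bounds:
--         p = type_norm[s:e].strip()
--         if p:
--             out.append(p)
--     return out
-- ===== Notes on version B (the rewrite author's own statement) =====
-- stated objective: alternative
-- what changed: B replaces A's character-by-character accumulation into a buffer with a two-pass scheme: one index scan collecting (start,end) segment boundaries at top-level arrows, then a separate slicing/stripping pass building the result.
import Mathlib
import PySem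

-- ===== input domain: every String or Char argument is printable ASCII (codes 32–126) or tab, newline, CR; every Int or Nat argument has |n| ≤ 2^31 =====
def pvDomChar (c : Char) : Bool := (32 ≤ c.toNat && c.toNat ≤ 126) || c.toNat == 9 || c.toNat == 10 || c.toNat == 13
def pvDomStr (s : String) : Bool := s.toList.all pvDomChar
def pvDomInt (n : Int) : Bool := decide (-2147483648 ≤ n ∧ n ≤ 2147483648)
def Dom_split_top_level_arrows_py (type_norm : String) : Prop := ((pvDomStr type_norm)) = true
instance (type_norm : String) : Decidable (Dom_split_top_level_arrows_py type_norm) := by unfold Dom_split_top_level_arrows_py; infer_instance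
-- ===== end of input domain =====

-- B collects (start,end) index boundaries in one pass and slices/strips in a second pass,
-- instead of A's single pass accumulating characters into a buffer. Alternative decomposition, same cost.

-- ===== PORT A =====
-- A's while loop over the string, with parts/buf/depth state; buf accumulated in order.
def pvGoA (cs : List Char) (parts : List String) (buf : List Char) (depth : Nat) : List String :=
  match cs with
  | [] =>
      let tail := PySem.Chars.strip buf
      if tail = [] then parts else parts ++ [String.ofList tail]
  | c :: rest =>
      if c = '(' ∨ c = '[' then pvGoA rest parts (buf ++ [c]) (depth + 1)
      else if c = ')' ∨ c = ']' then pvGoA rest parts (buf ++ [c]) (depth - 1)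
      else if depth = 0 ∧ c = '-' ∧ rest.head? = some '>' then
        let part := PySem.Chars.strip buf
        pvGoA rest.tail (if part = [] then parts else parts ++ [String.ofList part]) [] depth
      else pvGoA rest parts (buf ++ [c]) depth
termination_by cs.length

def split_top_level_arrows_py (type_norm : String) : List String :=
  pvGoA type_norm.toList [] [] 0

-- ===== PORT B =====
-- B's pass 1: scan by index, collecting the (start, end) boundaries of top-level segments.
def pvGoB (cs : List Char) (i depth start : Nat) (acc : List (Nat × Nat)) : List (Nat × Nat) :=
  match cs with
  | [] => acc ++ [(start, i)]
  | c :: rest =>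
      if c = '(' ∨ c = '[' then pvGoB rest (i + 1) (depth + 1) start acc
      else if c = ')' ∨ c = ']' then pvGoB rest (i + 1) (depth - 1) start acc
      else if depth = 0 ∧ c = '-' ∧ rest.head? = some '>' then
        pvGoB rest.tail (i + 2) depth (i + 2) (acc ++ [(start, i)])
      else pvGoB rest (i + 1) depth start acc
termination_by cs.length

-- B's pass 2: slice each boundary out of the string, strip, keep the non-empty ones.
def pvRender (cs : List Char) (bs : List (Nat × Nat)) : List String :=
  bs.filterMap (fun b =>
    let p := PySem.Chars.strip (PySem.List.slice cs (some (b.1 : Int)) (some (b.2 : Int)))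
    if p = [] then none else some (String.ofList p))

def split_top_level_arrows_py_alt (type_norm : String) : List String :=
  pvRender type_norm.toList (pvGoB type_norm.toList 0 0 0 [])

-- ===== PRECONDITION & SPEC =====
def Spec_split_top_level_arrows_py (type_norm : String) (out : List String) : Prop := out = split_top_level_arrows_py_alt type_norm
instance (type_norm : String) (out : List String) : Decidable (Spec_split_top_level_arrows_py type_norm out) := by unfold Spec_split_top_level_arrows_py; infer_instance

-- ===== CLAIM (what is proved, stated in full; the proofs are below) =====
def Claim_equal_split_top_level_arrows_py : Prop := ∀ (type_norm : String), Dom_split_top_level_arrows_py type_norm → Spec_split_top_level_arrows_py type_norm (split_top_level_arrows_py type_norm)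

-- ===== LEMMAS AND PROOFS =====

theorem pvRender_append (cs : List Char) (bs bs' : List (Nat × Nat)) :
    pvRender cs (bs ++ bs') = pvRender cs bs ++ pvRender cs bs' := by
  simp [pvRender]

-- buf extension: appending the character at index i extends the slice by one
theorem pvTake_snoc (full : List Char) (c : Char) (rest : List Char) (start i : Nat)
    (hsi : start ≤ i) (hcs : full.drop i = c :: rest) :
    (full.drop start).take (i - start) ++ [c] = (full.drop start).take (i + 1 - start) := by
  have hlt : i < full.length := by
    by_contra h
    have : full.drop i = [] := List.drop_eq_nil_of_le (by omega)
    simp [this] at hcs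
  have h1 : full.drop i = (full.drop start).drop (i - start) := by
    rw [List.drop_drop]; congr 1; omega
  have hlen : ((full.drop start).take (i - start)).length = i - start := by
    simp; omega
  have hsplit : full.drop start =
      (full.drop start).take (i - start) ++ (c :: rest) := by
    conv_lhs => rw [← List.take_append_drop (i - start) (full.drop start)]
    rw [← h1, hcs]
  calc (full.drop start).take (i - start) ++ [c]
      = ((full.drop start).take (i - start) ++ (c :: rest)).take (i + 1 - start) := by
        rw [List.take_append]
        have hA : List.take (i + 1 - start) (List.take (i - start) (List.drop start full))
            = List.take (i - start) (List.drop start full) :=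
          List.take_of_length_le (by rw [hlen]; omega)
        rw [hA, hlen]
        have h2 : i + 1 - start - (i - start) = 1 := by omega
        rw [h2]
        simp
    _ = (full.drop start).take (i + 1 - start) := by rw [← hsplit]

-- main simulation invariant: A's state vs B's collected boundaries
theorem pvMain (n : Nat) : ∀ (cs : List Char) (full : List Char) (i start depth : Nat)
    (acc : List (Nat × Nat)) (parts : List String),
    cs.length ≤ n → start ≤ i → cs = full.drop i →
    parts = pvRender full acc →
    pvGoA cs parts ((full.drop start).take (i - start)) depth
      = pvRender full (pvGoB cs i depth start acc) := by
  induction n with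
  | zero =>
      intro cs full i start depth acc parts hn hsi hcs hp
      have : cs = [] := List.eq_nil_of_length_eq_zero (by omega)
      subst this
      simp [pvGoA, pvGoB, hp, pvRender, PySem.List.slice_natCast]
      split <;> simp_all
  | succ n ih =>
      intro cs full i start depth acc parts hn hsi hcs hp
      match cs with
      | [] =>
          simp [pvGoA, pvGoB, hp, pvRender, PySem.List.slice_natCast]
          split <;> simp_all
      | c :: rest =>
          have hrest : rest = full.drop (i + 1) := by
            have : (full.drop i).tail = rest := by rw [← hcs]; rfl
            rw [← this, List.tail_drop]
          rw [pvGoA, pvGoB]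
          split_ifs with h1 h2 h3
          · rw [pvTake_snoc full c rest start i hsi (by rw [← hcs])]
            exact ih rest full (i+1) start (depth+1) acc parts (by simp at hn; omega)
              (by omega) hrest hp
          · rw [pvTake_snoc full c rest start i hsi (by rw [← hcs])]
            exact ih rest full (i+1) start (depth-1) acc parts (by simp at hn; omega)
              (by omega) hrest hp
          · have htl : rest.tail = full.drop (i + 2) := by
              rw [hrest, List.tail_drop]
            have hlt : (rest.tail).length ≤ n := by
              have : rest.tail.length ≤ rest.length := by
                cases rest <;> simp
              simp at hn; omega
            have hstep := ih rest.tail full (i+2) (i+2) depth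
              (acc ++ [(start, i)])
              (pvRender full (acc ++ [(start, i)])) hlt (by omega) htl rfl
            simp only [Nat.sub_self, List.take_zero] at hstep
            rw [← hstep]
            rw [pvRender_append, ← hp]
            simp [pvRender, PySem.List.slice_natCast]
            split <;> simp_all
          · rw [pvTake_snoc full c rest start i hsi (by rw [← hcs])]
            exact ih rest full (i+1) start depth acc parts (by simp at hn; omega)
              (by omega) hrest hp

-- ===== VERDICT (by name: the statement is the Claim_ definition above) =====
theorem split_top_level_arrows_py_spec : Claim_equal_split_top_level_arrows_py := by
  intro s _
  unfold Spec_split_top_level_arrows_py split_top_level_arrows_py split_top_level_arrows_py_alt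
  have := pvMain s.toList.length s.toList s.toList 0 0 0 [] []
    (le_refl _) (le_refl _) rfl (by simp [pvRender])
  simpa using this
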